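-- pv_equiv track=rewrite | github.com/GUCCIFER/IPViisard | IPViisard.py | netmaskToBin
-- ===== SOURCE A (Python) =====
-- def netmaskToBin(netmask, number1, number2):
--     netmaskBin = ""
--     i = 0
--     while i < 32:  # ip aadress on binaarselt 32 kohaline
--         if i % 8 == 0 and i != 0:  # 8 kaupa paneb punkti vahele
--             netmaskBin += "."
--         if i < int(netmask): # lisab nii kaua ühtesi või nulle kui vaja
--             netmaskBin += str(number1)
--         else:
--             netmaskBin += str(number2)
--         i += 1
--     return netmaskBin
-- ===== SOURCE B (Python) =====
-- def netmaskToBin(netmask, number1, number2):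
--     n = int(netmask)
--     tokens = [str(number1) if i < n else str(number2) for i in range(32)]
--     return '.'.join(''.join(tokens[j:j+8]) for j in range(0, 32, 8))
-- ===== Notes on version B (the rewrite author's own statement) =====
-- stated objective: simpler
-- what changed: B separates bit-generation from dot-placement: it builds the 32 tokens once as a list, then joins four 8-token octets with '.', instead of A's single while loop interleaving a modulo-8 dot test into string concatenation.
import Mathlib
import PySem

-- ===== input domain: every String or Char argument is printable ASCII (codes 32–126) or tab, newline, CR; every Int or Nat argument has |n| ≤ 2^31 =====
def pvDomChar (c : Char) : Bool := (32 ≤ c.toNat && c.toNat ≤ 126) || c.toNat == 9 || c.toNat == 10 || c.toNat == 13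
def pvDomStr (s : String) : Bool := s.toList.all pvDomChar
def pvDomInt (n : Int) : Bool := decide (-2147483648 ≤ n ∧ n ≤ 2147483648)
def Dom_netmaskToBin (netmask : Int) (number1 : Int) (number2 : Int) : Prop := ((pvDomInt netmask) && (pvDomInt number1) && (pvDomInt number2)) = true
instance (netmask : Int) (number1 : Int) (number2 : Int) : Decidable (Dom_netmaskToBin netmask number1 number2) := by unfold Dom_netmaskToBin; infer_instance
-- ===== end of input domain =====

-- B builds the 32 bit-tokens as a list first and joins four 8-token octets with '.',
-- instead of A's single while loop interleaving a modulo-8 dot test (objective: simpler decomposition).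

-- ===== PORT A =====
-- while i < 32 with i starting at 0 → fold over pyRange 0 32 1; branches in A's order.
def netmaskToBin (netmask : Int) (number1 : Int) (number2 : Int) : String :=
  (PySem.List.pyRange 0 32 1).foldl (fun acc i =>
    let acc := if PySem.Int.mod i 8 == 0 && i != 0 then acc ++ "." else acc
    if i < netmask then acc ++ PySem.Int.toStr number1 else acc ++ PySem.Int.toStr number2) ""

-- ===== PORT B =====
-- tokens comprehension → map over pyRange; '.'.join(''.join(tokens[j:j+8]) for j in range(0,32,8)).
def netmaskToBin_alt (netmask : Int) (number1 : Int) (number2 : Int) : String :=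
  let tokens := (PySem.List.pyRange 0 32 1).map
    (fun i => if i < netmask then PySem.Int.toStr number1 else PySem.Int.toStr number2)
  PySem.Str.join "." ((PySem.List.pyRange 0 32 8).map
    (fun j => PySem.Str.join "" (PySem.List.slice tokens (some j) (some (j + 8)))))

-- ===== PRECONDITION & SPEC =====
def Spec_netmaskToBin (netmask : Int) (number1 : Int) (number2 : Int) (out : String) : Prop := out = netmaskToBin_alt netmask number1 number2
instance (netmask : Int) (number1 : Int) (number2 : Int) (out : String) : Decidable (Spec_netmaskToBin netmask number1 number2 out) := by unfold Spec_netmaskToBin; infer_instance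

-- ===== CLAIM (what is proved, stated in full; the proofs are below) =====
def Claim_equal_netmaskToBin : Prop := ∀ (netmask : Int) (number1 : Int) (number2 : Int), Dom_netmaskToBin netmask number1 number2 → Spec_netmaskToBin netmask number1 number2 (netmaskToBin netmask number1 number2)

-- ===== LEMMAS AND PROOFS =====

-- Core fact: for ANY token function t, A's dot-interleaving fold over 0..31 equals
-- B's join of four 8-token slices of the token list. Both programs instantiate t
-- with the same token function, so this gives equality without case analysis on netmask.
lemma netmaskToBin_key (t : Int → String) :
    (PySem.List.pyRange 0 32 1).foldl (fun acc i =>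
      (if PySem.Int.mod i 8 == 0 && i != 0 then acc ++ "." else acc) ++ t i) ""
    = PySem.Str.join "." ((PySem.List.pyRange 0 32 8).map
        (fun j => PySem.Str.join "" (PySem.List.slice ((PySem.List.pyRange 0 32 1).map t) (some j) (some (j + 8))))) := by
  have hr2 : PySem.List.pyRange 0 32 1 = [0,1,2,3,4,5,6,7,8,9,10,11,12,13,14,15,16,17,18,19,20,21,22,23,24,25,26,27,28,29,30,31] := by decide
  have hr3 : PySem.List.pyRange 0 32 8 = [0,8,16,24] := by decide
  simp only [hr2, hr3, List.map]
  simp [PySem.List.slice, PySem.Str.join, PySem.Chars.join]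
  rw [← @String.toList_inj]
  simp [List.intercalate, List.append_assoc]

-- ===== VERDICT (by name: the statement is the Claim_ definition above) =====
theorem netmaskToBin_spec : Claim_equal_netmaskToBin := by
  intro n n1 n2 _
  unfold Spec_netmaskToBin
  have hf : (fun (acc : String) (i : Int) =>
      let acc := if PySem.Int.mod i 8 == 0 && i != 0 then acc ++ "." else acc
      if i < n then acc ++ PySem.Int.toStr n1 else acc ++ PySem.Int.toStr n2)
      = (fun (acc : String) (i : Int) =>
      (if PySem.Int.mod i 8 == 0 && i != 0 then acc ++ "." else acc) ++
        (if i < n then PySem.Int.toStr n1 else PySem.Int.toStr n2)) := by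
    funext acc i
    by_cases h : i < n <;> simp [h]
  unfold netmaskToBin netmaskToBin_alt
  rw [hf]
  exact netmaskToBin_key _
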